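-- pv_equiv track=rewrite | github.com/emilshal/diventoscraper | app/core/temp_scraper.py | _domain_matches_any
-- ===== SOURCE A (Python) =====
-- def _domain_matches_any(domain: str, allowed: set[str]) -> bool:
--     d = (domain or "").strip().lower()
--     if not d or not allowed:
--         return False
--     for a in allowed:
--         a = a.strip().lower()
--         if not a:
--             continue
--         if d == a or d.endswith("." + a):
--             return True
--     return False
-- ===== SOURCE B (Python) =====
-- def _domain_matches_any(domain: str, allowed: set[str]) -> bool:
--     d = (domain or "").strip().lower()
--     n = set()
--     for a in allowed:
--         a = a.strip().lower()
--         if a: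
--             n.add(a)
--     if not d or not n:
--         return False
--     if d in n:
--         return True
--     t = d
--     while t:
--         c, t = t[0], t[1:]
--         if c == '.' and t in n:
--             return True
--     return False
-- ===== Notes on version B (the rewrite author's own statement) =====
-- stated objective: alternative
-- what changed: Instead of scanning the allowed set with an endswith check per entry, B builds the normalized non-empty allowed set once and then walks the domain's dot-delimited suffixes, testing each by set membership.
import Mathlib
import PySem

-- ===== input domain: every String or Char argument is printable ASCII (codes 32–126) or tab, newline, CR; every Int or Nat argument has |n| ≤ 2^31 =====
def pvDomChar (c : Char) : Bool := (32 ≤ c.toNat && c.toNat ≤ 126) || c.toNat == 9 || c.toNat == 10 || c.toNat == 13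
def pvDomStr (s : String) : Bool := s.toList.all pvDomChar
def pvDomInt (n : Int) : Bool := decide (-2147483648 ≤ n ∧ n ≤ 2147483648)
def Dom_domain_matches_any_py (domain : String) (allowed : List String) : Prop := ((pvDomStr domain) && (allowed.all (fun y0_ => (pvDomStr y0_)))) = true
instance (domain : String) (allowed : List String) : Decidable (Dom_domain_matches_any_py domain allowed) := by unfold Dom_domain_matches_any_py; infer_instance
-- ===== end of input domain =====

-- B replaces A's per-entry endswith scan over `allowed` by one pass building the normalized
-- allowed set and one walk over the domain's dot-delimited suffixes with set membership (objective: alternative).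

-- ===== PORT A =====
-- shared normalization `a.strip().lower()` (both Pythons contain this expression)
def pvNorm (a : String) : String := PySem.Str.lower (PySem.Str.strip a)

-- A's `for a in allowed: ...` loop with early return
def pvAGo (d : String) : List String → Bool
  | [] => false
  | a :: rest =>
    let a' := pvNorm a
    if a' = "" then pvAGo d rest
    else if d = a' || PySem.Str.endswith d ("." ++ a') then true
    else pvAGo d rest

def domain_matches_any_py (domain : String) (allowed : List String) : Bool :=
  let d := pvNorm (if domain = "" then "" else domain)   -- (domain or "").strip().lower()
  if d = "" || allowed.isEmpty then false
  else pvAGo d allowed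

-- ===== PORT B =====
-- B's `while t:` loop over the tails of d, testing each dot-delimited suffix for membership
def pvSuffGo (n : PySem.Set String) : List Char → Bool
  | [] => false
  | c :: t =>
    if c = '.' && PySem.Set.contains n (String.ofList t) then true
    else pvSuffGo n t

def domain_matches_any_py_alt (domain : String) (allowed : List String) : Bool :=
  let d := pvNorm (if domain = "" then "" else domain)
  let n : PySem.Set String :=
    allowed.foldl (fun s a => let a' := pvNorm a; if a' = "" then s else PySem.Set.add s a')
      PySem.Set.empty
  if d = "" || n.isEmpty then false
  else if PySem.Set.contains n d then true
  else pvSuffGo n d.toList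

-- ===== PRECONDITION & SPEC =====
def Spec_domain_matches_any_py (domain : String) (allowed : List String) (out : Bool) : Prop := out = domain_matches_any_py_alt domain allowed
instance (domain : String) (allowed : List String) (out : Bool) : Decidable (Spec_domain_matches_any_py domain allowed out) := by unfold Spec_domain_matches_any_py; infer_instance

-- ===== CLAIM (what is proved, stated in full; the proofs are below) =====
def Claim_equal_domain_matches_any_py : Prop := ∀ (domain : String) (allowed : List String), Dom_domain_matches_any_py domain allowed → Spec_domain_matches_any_py domain allowed (domain_matches_any_py domain allowed)

-- ===== LEMMAS AND PROOFS =====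

theorem pvAGo_iff (d : String) (l : List String) :
    pvAGo d l = true ↔
      ∃ a ∈ l, pvNorm a ≠ "" ∧ (d = pvNorm a ∨ PySem.Str.endswith d ("." ++ pvNorm a) = true) := by
  induction l with
  | nil => simp [pvAGo]
  | cons a rest ih =>
    simp only [pvAGo, List.mem_cons]
    split_ifs with h1 h2
    · simp only [ih]
      constructor
      · rintro ⟨b, hb, h⟩; exact ⟨b, Or.inr hb, h⟩
      · rintro ⟨b, hb | hb, h⟩
        · subst hb; exact absurd h1 h.1
        · exact ⟨b, hb, h⟩
    · simp only [true_iff]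
      refine ⟨a, Or.inl rfl, h1, ?_⟩
      simpa [Bool.or_eq_true, decide_eq_true_iff] using h2
    · simp only [ih]
      constructor
      · rintro ⟨b, hb, h⟩; exact ⟨b, Or.inr hb, h⟩
      · rintro ⟨b, hb | hb, h⟩
        · subst hb
          exact absurd (by simpa [Bool.or_eq_true, decide_eq_true_iff] using h.2) h2
        · exact ⟨b, hb, h⟩

theorem pvN_mem (l : List String) (s : PySem.Set String) (x : String) :
    x ∈ l.foldl (fun s a => let a' := pvNorm a; if a' = "" then s else PySem.Set.add s a') s ↔
      x ∈ s ∨ ∃ a ∈ l, pvNorm a ≠ "" ∧ x = pvNorm a := by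
  induction l generalizing s with
  | nil => simp
  | cons a rest ih =>
    simp only [List.foldl_cons, ih, List.mem_cons]
    split_ifs with h1
    · constructor
      · rintro (h | ⟨b, hb, h⟩)
        · exact Or.inl h
        · exact Or.inr ⟨b, Or.inr hb, h⟩
      · rintro (h | ⟨b, hb | hb, h⟩)
        · exact Or.inl h
        · subst hb; exact absurd h1 h.1
        · exact Or.inr ⟨b, hb, h⟩
    · rw [PySem.Set.mem_add]
      constructor
      · rintro ((h | h) | ⟨b, hb, h⟩)
        · exact Or.inl h
        · exact Or.inr ⟨a, Or.inl rfl, h1, h⟩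
        · exact Or.inr ⟨b, Or.inr hb, h⟩
      · rintro (h | ⟨b, hb | hb, h⟩)
        · exact Or.inl (Or.inl h)
        · subst hb; exact Or.inl (Or.inr h.2)
        · exact Or.inr ⟨b, hb, h⟩

theorem pvSuffGo_iff (n : PySem.Set String) (l : List Char) :
    pvSuffGo n l = true ↔
      ∃ pre t, l = pre ++ '.' :: t ∧ PySem.Set.contains n (String.ofList t) = true := by
  induction l with
  | nil =>
    constructor
    · intro h; simp [pvSuffGo] at h
    · rintro ⟨pre, t, h, -⟩; exact absurd h (by simp)
  | cons c rest ih =>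
    simp only [pvSuffGo]
    split_ifs with h1
    · simp only [Bool.and_eq_true, decide_eq_true_iff] at h1
      simp only [true_iff]
      exact ⟨[], rest, by simp [h1.1], h1.2⟩
    · rw [ih]
      constructor
      · rintro ⟨pre, t, h, hc⟩
        exact ⟨c :: pre, t, by simp [h], hc⟩
      · rintro ⟨pre, t, h, hc⟩
        cases pre with
        | nil =>
          simp only [List.nil_append, List.cons.injEq] at h
          obtain ⟨hc', ht⟩ := h
          subst ht; subst hc'
          exact absurd (by simpa using hc) h1
        | cons c' pre' =>
          simp only [List.cons_append, List.cons.injEq] at h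
          exact ⟨pre', t, h.2, hc⟩

theorem pvEndswith_iff (d a' : String) :
    PySem.Str.endswith d ("." ++ a') = true ↔ ∃ pre, d.toList = pre ++ '.' :: a'.toList := by
  rw [PySem.Str.endswith_eq]
  have : ("." ++ a').toList = '.' :: a'.toList := by simp
  rw [this, PySem.Chars.endswith_iff]
  constructor
  · rintro ⟨pre, h⟩; exact ⟨pre, h.symm⟩
  · rintro ⟨pre, h⟩; exact ⟨pre, h.symm⟩

-- ===== VERDICT (by name: the statement is the Claim_ definition above) =====
theorem domain_matches_any_py_spec : Claim_equal_domain_matches_any_py := by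
  intro domain allowed _
  unfold Spec_domain_matches_any_py domain_matches_any_py domain_matches_any_py_alt
  set d := pvNorm (if domain = "" then "" else domain) with hd
  set n := allowed.foldl (fun s a => let a' := pvNorm a; if a' = "" then s else PySem.Set.add s a')
      PySem.Set.empty with hn
  have hmem : ∀ x, x ∈ n ↔ ∃ a ∈ allowed, pvNorm a ≠ "" ∧ x = pvNorm a := by
    intro x; rw [hn, pvN_mem]; simp [PySem.Set.empty]
  rw [Bool.eq_iff_iff]
  by_cases hde : d = ""
  · simp [hde]
  · simp only [hde, decide_false, Bool.false_or, pvAGo_iff, Bool.not_eq_eq_eq_not, Bool.not_true,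
      Bool.if_false_left, Bool.and_eq_true, decide_eq_false_iff_not]
    constructor
    · rintro ⟨-, a, ha, hane, hcase⟩
      have hdn : pvNorm a ∈ n := (hmem _).mpr ⟨a, ha, hane, rfl⟩
      refine ⟨by simp only [List.isEmpty_iff]; exact List.ne_nil_of_mem hdn, ?_⟩
      rcases hcase with hcase | hcase
      · rw [if_pos ((PySem.Set.contains_iff _ _).mpr (hcase ▸ hdn))]
      · by_cases hcd : PySem.Set.contains n d = true
        · rw [if_pos hcd]
        · rw [if_neg hcd]
          obtain ⟨pre, hpre⟩ := (pvEndswith_iff d (pvNorm a)).mp hcase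
          refine (pvSuffGo_iff n d.toList).mpr ⟨pre, (pvNorm a).toList, hpre, ?_⟩
          rw [String.ofList_toList]
          exact (PySem.Set.contains_iff _ _).mpr hdn
    · rintro ⟨-, hif⟩
      by_cases hcd : PySem.Set.contains n d = true
      · obtain ⟨a, ha, hane, hda⟩ := (hmem d).mp ((PySem.Set.contains_iff _ _).mp hcd)
        exact ⟨by simp only [List.isEmpty_iff]; exact List.ne_nil_of_mem ha,
          a, ha, hane, Or.inl hda⟩
      · rw [if_neg hcd] at hif
        obtain ⟨pre, t, hsplit, hct⟩ := (pvSuffGo_iff n d.toList).mp hif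
        obtain ⟨a, ha, hane, hmk⟩ := (hmem _).mp ((PySem.Set.contains_iff _ _).mp hct)
        refine ⟨by simp only [List.isEmpty_iff]; exact List.ne_nil_of_mem ha,
          a, ha, hane, Or.inr ?_⟩
        rw [pvEndswith_iff]
        exact ⟨pre, by rw [hsplit, ← hmk, String.toList_ofList]⟩
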